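-- pv_equiv track=rewrite | github.com/AdamZhouSE/pythonHomework | Code/CodeRecords/2193/60870/297196.py | maxSame
-- ===== SOURCE A (Python) =====
-- def maxSame(check_list):
--     list_valid = []
--     for i in range(len(check_list) - 1):
--         for j in range(i + 1, len(check_list)):
--             size = 0
--             for k in range(0, min(len(check_list[i]), len(check_list[j]))):
--                 if check_list[i][len(check_list[i]) - k - 1] == check_list[j][len(check_list[j]) - k - 1]:
--                     size = size + 1
--                 else:
--                     break
--             list_valid.append(size)
--     return max(list_valid)
-- ===== SOURCE B (Python) =====
-- def maxSame(check_list):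
--     # Single left-to-right pass: 'seen' holds every non-empty prefix of the
--     # reversed strings processed so far; for each new string the while loop
--     # finds the longest such prefix it shares, i.e. the longest common suffix
--     # with any earlier string.
--     best = 0
--     seen = set()
--     for s in check_list:
--         r = s[::-1]
--         k = 0
--         while k < len(r) and r[:k + 1] in seen:
--             k += 1
--         if k > best:
--             best = k
--         seen.update(r[:m] for m in range(1, len(r) + 1))
--     return best
-- ===== Notes on version B (the rewrite author's own statement) =====
-- stated objective: faster
-- what changed: A scans every pair of strings character by character from the end (quadratic in the number of strings); B makes one left-to-right pass keeping a set of all suffixes of earlier strings and, per string, looks up its longest suffix already in the set, removing the pairwise scan.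
-- outside the precondition, e.g. on maxSame([]): A raises ValueError, B returns 0; on maxSame(['x']): A raises ValueError, B returns 0
import Mathlib
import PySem

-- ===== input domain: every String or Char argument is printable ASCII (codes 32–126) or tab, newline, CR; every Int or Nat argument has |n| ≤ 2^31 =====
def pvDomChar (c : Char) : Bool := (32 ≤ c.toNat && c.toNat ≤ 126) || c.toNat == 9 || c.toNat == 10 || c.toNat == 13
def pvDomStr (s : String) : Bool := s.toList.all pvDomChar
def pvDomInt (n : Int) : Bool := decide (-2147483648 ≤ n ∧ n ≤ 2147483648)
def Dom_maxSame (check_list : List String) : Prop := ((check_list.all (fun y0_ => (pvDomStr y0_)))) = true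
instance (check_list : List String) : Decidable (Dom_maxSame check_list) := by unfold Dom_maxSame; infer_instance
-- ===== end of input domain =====

-- B replaces A's all-pairs character scan by one left-to-right pass that keeps a set of
-- all suffixes seen so far and, per string, finds its longest suffix already in the set
-- (objective: alternative single-pass algorithm; same return value wherever A returns).


-- ===== PORT A =====
-- A's innermost loop: 'for k in range(0, min(len(si), len(sj))): if si[-k-1] == sj[-k-1]: size += 1 else: break'.
-- Both indices are in range for every k the loop reaches, so Option equality of pyGet? is exactly Python's char comparison.
def aInner (si sj : List Char) : List Int → Int → Int
  | [], size => size
  | k :: ks, size =>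
    if PySem.List.pyGet? si ((si.length : Int) - k - 1) = PySem.List.pyGet? sj ((sj.length : Int) - k - 1)
    then aInner si sj ks (size + 1)
    else size

def maxSame (check_list : List String) : Int :=
  let list_valid : List Int :=
    (PySem.List.pyRange 0 ((check_list.length : Int) - 1) 1).foldl (fun acc i =>
      (PySem.List.pyRange (i + 1) (check_list.length : Int) 1).foldl (fun acc2 j =>
        -- check_list[i] / check_list[j]: i, j are always in range here, so pyGetD's default is never used
        acc2 ++ [aInner (PySem.List.pyGetD check_list i "").toList (PySem.List.pyGetD check_list j "").toList
          (PySem.List.pyRange 0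
            ((min (PySem.List.pyGetD check_list i "").toList.length (PySem.List.pyGetD check_list j "").toList.length : Nat) : Int) 1) 0]) acc)
      []
  -- max(list_valid); Pre_ excludes the lists on which it is empty (Python ValueError)
  (PySem.List.max? list_valid (fun x => x)).getD 0

-- ===== PORT B =====
-- B's 'while k < len(r) and r[:k+1] in seen: k += 1'
-- the loop increments k only while k < len(r), so r.length - k bounds the remaining
-- iterations and serves as structural fuel (bScan below supplies exactly that much).
def bScanGo (seen : PySem.Set (List Char)) (r : List Char) : Nat → Nat → Nat
  | 0, k => k
  | fuel + 1, k =>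
    if k < r.length ∧ PySem.Set.contains seen (PySem.List.slice r none (some ((k : Int) + 1)))
    then bScanGo seen r fuel (k + 1)
    else k

def bScan (seen : PySem.Set (List Char)) (r : List Char) (k : Nat) : Nat :=
  bScanGo seen r (r.length - k) k

def maxSame_alt (check_list : List String) : Int :=
  (check_list.foldl (fun (st : Int × PySem.Set (List Char)) s =>
      let r := s.toList.reverse        -- r = s[::-1]  (PySem.List.slice?_none_none_neg_one)
      let k := bScan st.2 r 0
      let best := if (k : Int) > st.1 then (k : Int) else st.1
      -- seen.update(r[:m] for m in range(1, len(r)+1))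
      (best, PySem.Set.update st.2
        ((PySem.List.pyRange 1 ((r.length : Int) + 1) 1).map (fun m => PySem.List.slice r none (some m)))))
    (0, PySem.Set.empty)).1

-- ===== PRECONDITION & SPEC =====
-- Pre_ excludes lists of fewer than two strings: there A's 'max(list_valid)' is max of an
-- empty list and raises ValueError (B naturally returns 0 there).
def Pre_maxSame (check_list : List String) : Prop := 2 ≤ check_list.length
instance (check_list : List String) : Decidable (Pre_maxSame check_list) := by unfold Pre_maxSame; infer_instance
def pvWitness_maxSame : List String := ["ab", "cb"]

def Spec_maxSame (check_list : List String) (out : Int) : Prop := out = maxSame_alt check_list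
instance (check_list : List String) (out : Int) : Decidable (Spec_maxSame check_list out) := by unfold Spec_maxSame; infer_instance

-- ===== CLAIM (what is proved, stated in full; the proofs are below) =====
def Claim_equal_maxSame : Prop := ∀ (check_list : List String), Dom_maxSame check_list → Pre_maxSame check_list → Spec_maxSame check_list (maxSame check_list)

-- ===== LEMMAS AND PROOFS =====

-- length of the longest common prefix of two character lists
def lcp : List Char → List Char → Nat
  | a :: as, b :: bs => if a = b then lcp as bs + 1 else 0
  | _, _ => 0

-- the common-suffix length of two strings, as an Int
def cslv (s t : String) : Int := (lcp s.toList.reverse t.toList.reverse : Nat)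

-- v is the common-suffix length of some ordered pair of strings of l
def IsPV (l : List String) (v : Int) : Prop := ∃ t u, [t, u].Sublist l ∧ v = cslv t u

-- m is THE maximum pair value of l (with 0 if every pair value vanishes)
def GoodMax (l : List String) (m : Int) : Prop :=
  (∀ v, IsPV l v → v ≤ m) ∧ 0 ≤ m ∧ (m = 0 ∨ IsPV l m)

theorem lcp_nil_right (a : List Char) : lcp a [] = 0 := by cases a <;> rfl

theorem lcp_comm (a : List Char) : ∀ b, lcp a b = lcp b a := by
  induction a with
  | nil => intro b; cases b <;> rfl
  | cons x as ih =>
    intro b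
    cases b with
    | nil => rfl
    | cons y bs =>
      simp only [lcp]
      by_cases h : x = y
      · subst h; simp [ih]
      · simp [Ne.symm h, fun hh : x = y => h hh]

theorem lcp_le_left (a : List Char) : ∀ b, lcp a b ≤ a.length := by
  induction a with
  | nil => intro b; cases b <;> simp [lcp]
  | cons x as ih =>
    intro b
    cases b with
    | nil => simp [lcp]
    | cons y bs => simp only [lcp]; split <;> simp [Nat.succ_le_succ (ih bs)]

theorem take_prefix_iff_lcp (m : Nat) : ∀ (a b : List Char), m ≤ a.length →
    (a.take m <+: b ↔ m ≤ lcp a b) := by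
  induction m with
  | zero => intro a b _; simp
  | succ m ih =>
    intro a b hm
    cases a with
    | nil => simp at hm
    | cons x as =>
      cases b with
      | nil => simp [List.take, lcp_nil_right]
      | cons y bs =>
        simp only [List.take, lcp]
        by_cases h : x = y
        · subst h
          simp only [if_pos trivial, List.cons_prefix_cons, true_and]
          rw [ih as bs (by simpa using hm)]
          omega
        · simp [List.cons_prefix_cons, h]

-- pair-sublist ↔ two indices
theorem pair_sublist_iff (t u : String) : ∀ (l : List String),
    ([t, u].Sublist l ↔ ∃ i j : Nat, i < j ∧ l[i]? = some t ∧ l[j]? = some u) := by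
  intro l
  induction l with
  | nil => simp
  | cons a l ih =>
    constructor
    · intro h
      rcases List.sublist_cons_iff.mp h with h' | ⟨r, hr, hrs⟩
      · rcases ih.mp h' with ⟨i, j, hij, hi, hj⟩
        exact ⟨i + 1, j + 1, by omega, by simpa using hi, by simpa using hj⟩
      · cases hr
        have hu : u ∈ l := List.singleton_sublist.mp hrs
        rcases List.getElem_of_mem hu with ⟨j, hjl, hj⟩
        exact ⟨0, j + 1, by omega, rfl, by simpa using (List.getElem?_eq_getElem hjl).trans (by rw [hj])⟩
    · rintro ⟨i, j, hij, hi, hj⟩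
      cases i with
      | zero =>
        simp only [List.getElem?_cons_zero, Option.some.injEq] at hi
        subst hi
        cases j with
        | zero => omega
        | succ j =>
          simp only [List.getElem?_cons_succ] at hj
          exact List.cons_sublist_cons.mpr (List.singleton_sublist.mpr (List.mem_of_getElem? hj))
      | succ i =>
        cases j with
        | zero => omega
        | succ j =>
          simp only [List.getElem?_cons_succ] at hi hj
          exact (ih.mpr ⟨i, j, by omega, hi, hj⟩).cons a

theorem goodmax_unique {l : List String} {m m' : Int}
    (h : GoodMax l m) (h' : GoodMax l m') : m = m' := by
  rcases h with ⟨hb, h0, he⟩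
  rcases h' with ⟨hb', h0', he'⟩
  have h1 : m ≤ m' := by
    rcases he with h | h
    · omega
    · exact hb' _ h
  have h2 : m' ≤ m := by
    rcases he' with h | h
    · omega
    · exact hb _ h
  omega

theorem lcp_nil_left (b : List Char) : lcp [] b = 0 := by cases b <;> rfl

-- ---- A side: the innermost loop computes lcp of the reversed strings ----
theorem aInner_eq (si sj : List Char) :
    ∀ (n k : Nat), k + n = min si.length sj.length → ∀ size : Int,
      aInner si sj (PySem.List.pyRange (k : Int) ((min si.length sj.length : Nat) : Int) 1) size
        = size + lcp (si.reverse.drop k) (sj.reverse.drop k) := by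
  intro n
  induction n with
  | zero =>
    intro k hk size
    rw [PySem.List.pyRange_one_eq_nil (by omega)]
    have h0 : lcp (si.reverse.drop k) (sj.reverse.drop k) = 0 := by
      by_cases hmin : si.length ≤ sj.length
      · have : si.reverse.drop k = [] := by
          apply List.drop_eq_nil_of_le; simp; omega
        rw [this, lcp_nil_left]
      · have : sj.reverse.drop k = [] := by
          apply List.drop_eq_nil_of_le; simp; omega
        rw [this, lcp_nil_right]
    simp [aInner, h0]
  | succ n ih =>
    intro k hk size
    have hk1 : k < si.length := by omega
    have hk2 : k < sj.length := by omega
    have hr1 : k < si.reverse.length := by simpa using hk1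
    have hr2 : k < sj.reverse.length := by simpa using hk2
    rw [PySem.List.pyRange_one_cons (by push_cast; omega)]
    have e1 : PySem.List.pyGet? si ((si.length : Int) - (k : Int) - 1) = si.reverse[k]? := by
      have : ((si.length : Int) - (k : Int) - 1) = ((si.length - 1 - k : Nat) : Int) := by push_cast; omega
      rw [this, PySem.List.pyGet?_natCast, List.getElem?_reverse (l := si) (by omega)]
    have e2 : PySem.List.pyGet? sj ((sj.length : Int) - (k : Int) - 1) = sj.reverse[k]? := by
      have : ((sj.length : Int) - (k : Int) - 1) = ((sj.length - 1 - k : Nat) : Int) := by push_cast; omega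
      rw [this, PySem.List.pyGet?_natCast, List.getElem?_reverse (l := sj) (by omega)]
    have d1 : si.reverse.drop k = si.reverse[k] :: si.reverse.drop (k + 1) := List.drop_eq_getElem_cons hr1
    have d2 : sj.reverse.drop k = sj.reverse[k] :: sj.reverse.drop (k + 1) := List.drop_eq_getElem_cons hr2
    simp only [aInner, e1, e2, List.getElem?_eq_getElem hr1, List.getElem?_eq_getElem hr2]
    by_cases hc : si.reverse[k] = sj.reverse[k]
    · rw [if_pos (by rw [hc])]
      have : ((k : Int) + 1) = (((k + 1 : Nat)) : Int) := by push_cast; ring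
      rw [this, ih (k + 1) (by omega) (size + 1)]
      rw [d1, d2]
      simp only [lcp, if_pos hc]
      push_cast; ring
    · rw [if_neg (by simpa using hc)]
      rw [d1, d2]
      simp only [lcp, if_neg hc]
      simp

theorem cslv_nonneg (t u : String) : 0 ≤ cslv t u := by simp [cslv]

-- A's list_valid, written as a flatMap of pair values
def lvList (l : List String) : List Int :=
  (PySem.List.pyRange 0 ((l.length : Int) - 1) 1).flatMap (fun i =>
    (PySem.List.pyRange (i + 1) (l.length : Int) 1).map (fun j =>
      cslv (PySem.List.pyGetD l i "") (PySem.List.pyGetD l j "")))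

theorem maxSame_eq_lv (l : List String) :
    maxSame l = (PySem.List.max? (lvList l) (fun x => x)).getD 0 := by
  unfold maxSame lvList
  simp only [PySem.List.foldl_append_singleton_eq_map, PySem.List.foldl_append_eq_flatMap,
    List.nil_append]
  have hfun : ∀ i j : Int,
      aInner (PySem.List.pyGetD l i "").toList (PySem.List.pyGetD l j "").toList
        (PySem.List.pyRange 0
          ((min (PySem.List.pyGetD l i "").toList.length (PySem.List.pyGetD l j "").toList.length : Nat) : Int) 1) 0
        = cslv (PySem.List.pyGetD l i "") (PySem.List.pyGetD l j "") := by
    intro i j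
    have h := aInner_eq (PySem.List.pyGetD l i "").toList (PySem.List.pyGetD l j "").toList
      (min (PySem.List.pyGetD l i "").toList.length (PySem.List.pyGetD l j "").toList.length)
      0 (by omega) 0
    simpa [cslv] using h
  simp only [hfun]

theorem mem_lvList (l : List String) (v : Int) : v ∈ lvList l ↔ IsPV l v := by
  unfold lvList
  simp only [List.mem_flatMap, List.mem_map, PySem.List.mem_pyRange_one]
  constructor
  · rintro ⟨i, ⟨hi0, hi1⟩, j, ⟨hj0, hj1⟩, hv⟩
    have hIn : i.toNat < l.length := by omega
    have hJn : j.toNat < l.length := by omega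
    refine ⟨l[i.toNat], l[j.toNat], (pair_sublist_iff _ _ l).mpr
      ⟨i.toNat, j.toNat, by omega, List.getElem?_eq_getElem hIn, List.getElem?_eq_getElem hJn⟩, ?_⟩
    rw [← hv, PySem.List.pyGetD_eq_getElem l "" (by omega) (by push_cast; omega),
      PySem.List.pyGetD_eq_getElem l "" (by omega) (by push_cast; omega)]
  · rintro ⟨t, u, hsub, hv⟩
    rcases (pair_sublist_iff _ _ l).mp hsub with ⟨I, J, hIJ, hIt, hJu⟩
    have hJn : J < l.length := (List.getElem?_eq_some_iff.mp hJu).1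
    have hIn : I < l.length := by omega
    refine ⟨(I : Int), ⟨by omega, by push_cast; omega⟩, (J : Int), ⟨by push_cast; omega, by push_cast; omega⟩, ?_⟩
    rw [PySem.List.pyGetD_eq_getElem l "" (by omega) (by push_cast; omega),
      PySem.List.pyGetD_eq_getElem l "" (by omega) (by push_cast; omega)]
    simp only [Int.toNat_natCast]
    have ht : l[I] = t := by simpa [List.getElem?_eq_getElem hIn] using hIt
    have hu : l[J] = u := by simpa [List.getElem?_eq_getElem hJn] using hJu
    rw [ht, hu, hv]

theorem A_good (l : List String) (h2 : 2 ≤ l.length) : GoodMax l (maxSame l) := by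
  rw [maxSame_eq_lv]
  have h0 : 0 < l.length := by omega
  have h1 : 1 < l.length := by omega
  have hmem : cslv l[0] l[1] ∈ lvList l := by
    refine (mem_lvList l _).mpr ⟨l[0], l[1], (pair_sublist_iff _ _ l).mpr
      ⟨0, 1, by omega, List.getElem?_eq_getElem h0, List.getElem?_eq_getElem h1⟩, rfl⟩
  obtain ⟨m, hm⟩ : ∃ m, PySem.List.max? (lvList l) (fun x => x) = some m := by
    cases hmax : PySem.List.max? (lvList l) (fun x => x) with
    | none =>
      rw [PySem.List.max?_eq_none_iff] at hmax
      rw [hmax] at hmem; simp at hmem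
    | some m => exact ⟨m, rfl⟩
  rw [hm]
  simp only [Option.getD_some]
  have hmmem : IsPV l m := (mem_lvList l m).mp (PySem.List.max?_mem hm)
  refine ⟨?_, ?_, Or.inr hmmem⟩
  · intro v hv
    exact PySem.List.max?_isMax hm v ((mem_lvList l v).mpr hv)
  · rcases hmmem with ⟨t, u, _, hv⟩
    rw [hv]; exact cslv_nonneg t u

-- ---- B side ----
-- seen holds exactly the non-empty suffixes (reversed: prefixes) of the processed strings
def SeenInv (p : List String) (seen : PySem.Set (List Char)) : Prop :=
  ∀ x : List Char, x ∈ seen ↔ (x ≠ [] ∧ ∃ s ∈ p, x <+: s.toList.reverse)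

theorem slice_take (r : List Char) (k : Nat) :
    PySem.List.slice r none (some ((k : Int) + 1)) = r.take (k + 1) := by
  rw [PySem.List.slice_to r (by omega)]
  congr 1

theorem bScanGo_spec (p : List String) (seen : PySem.Set (List Char)) (hseen : SeenInv p seen)
    (r : List Char) :
    ∀ (fuel k : Nat), k + fuel = r.length →
      (k = 0 ∨ ∃ s ∈ p, k ≤ lcp r s.toList.reverse) →
      (∀ s ∈ p, lcp r s.toList.reverse ≤ bScanGo seen r fuel k) ∧
      (bScanGo seen r fuel k = 0 ∨ ∃ s ∈ p, bScanGo seen r fuel k = lcp r s.toList.reverse) := by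
  intro fuel
  induction fuel with
  | zero =>
    intro k hk hyp
    simp only [bScanGo]
    constructor
    · intro s hs
      have := lcp_le_left r s.toList.reverse
      omega
    · rcases hyp with h0 | ⟨s, hs, hle⟩
      · exact Or.inl h0
      · refine Or.inr ⟨s, hs, ?_⟩
        have := lcp_le_left r s.toList.reverse
        omega
  | succ fuel ih =>
    intro k hk hyp
    have hkr : k < r.length := by omega
    have hcond : (k < r.length ∧
        PySem.Set.contains seen (PySem.List.slice r none (some ((k : Int) + 1))) = true)
        ↔ (∃ s ∈ p, k + 1 ≤ lcp r s.toList.reverse) := by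
      rw [slice_take, PySem.Set.contains_iff, hseen (r.take (k + 1))]
      have hlen : (r.take (k + 1)).length = k + 1 := by simp; omega
      constructor
      · rintro ⟨_, _, s, hs, hpre⟩
        exact ⟨s, hs, (take_prefix_iff_lcp (k + 1) r s.toList.reverse (by omega)).mp hpre⟩
      · rintro ⟨s, hs, hle⟩
        refine ⟨hkr, ?_, s, hs, (take_prefix_iff_lcp (k + 1) r s.toList.reverse (by omega)).mpr hle⟩
        intro hnil
        rw [hnil] at hlen
        simp at hlen
    simp only [bScanGo]
    by_cases hc : k < r.length ∧
        PySem.Set.contains seen (PySem.List.slice r none (some ((k : Int) + 1))) = true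
    · rw [if_pos hc]
      exact ih (k + 1) (by omega) (Or.inr (hcond.mp hc))
    · rw [if_neg hc]
      have hub : ∀ s ∈ p, lcp r s.toList.reverse ≤ k := by
        intro s hs
        by_contra hgt
        exact hc (hcond.mpr ⟨s, hs, by omega⟩)
      refine ⟨hub, ?_⟩
      rcases hyp with h0 | ⟨s, hs, hle⟩
      · exact Or.inl h0
      · exact Or.inr ⟨s, hs, le_antisymm hle (hub s hs)⟩

theorem pair_sublist_append (t u s : String) (p : List String) :
    [t, u].Sublist (p ++ [s]) ↔ [t, u].Sublist p ∨ (u = s ∧ t ∈ p) := by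
  rw [List.sublist_append_iff]
  constructor
  · rintro ⟨l₁, l₂, heq, h1, h2⟩
    rcases List.sublist_singleton.mp h2 with h | h
    · subst h
      simp only [List.append_nil] at heq
      subst heq
      exact Or.inl h1
    · subst h
      rcases l₁ with _ | ⟨a, _ | ⟨c, l⟩⟩
      · simp at heq
      · simp only [List.cons_append, List.nil_append, List.cons.injEq] at heq
        rcases heq with ⟨ha, hs, -⟩
        subst ha
        exact Or.inr ⟨hs, List.singleton_sublist.mp h1⟩
      · simp at heq
  · rintro (h | ⟨hu, ht⟩)
    · exact ⟨[t, u], [], by simp, h, by simp⟩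
    · exact ⟨[t], [u], rfl, List.singleton_sublist.mpr ht, by simp [hu]⟩

theorem isPV_append (p : List String) (s : String) (v : Int) :
    IsPV (p ++ [s]) v ↔ IsPV p v ∨ ∃ t ∈ p, v = cslv t s := by
  unfold IsPV
  constructor
  · rintro ⟨t, u, hsub, hv⟩
    rcases (pair_sublist_append t u s p).mp hsub with h | ⟨hu, ht⟩
    · exact Or.inl ⟨t, u, h, hv⟩
    · subst hu
      exact Or.inr ⟨t, ht, hv⟩
  · rintro (⟨t, u, hsub, hv⟩ | ⟨t, ht, hv⟩)
    · exact ⟨t, u, (pair_sublist_append t u s p).mpr (Or.inl hsub), hv⟩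
    · exact ⟨t, s, (pair_sublist_append t s s p).mpr (Or.inr ⟨rfl, ht⟩), hv⟩

theorem mem_prefixList (r x : List Char) :
    x ∈ (PySem.List.pyRange 1 ((r.length : Int) + 1) 1).map
        (fun m => PySem.List.slice r none (some m))
      ↔ (x ≠ [] ∧ x <+: r) := by
  simp only [List.mem_map, PySem.List.mem_pyRange_one]
  constructor
  · rintro ⟨m, ⟨hm1, hm2⟩, hx⟩
    rw [PySem.List.slice_to r (by omega)] at hx
    subst hx
    have hlen : (r.take m.toNat).length = m.toNat := by simp; omega
    refine ⟨?_, List.take_prefix _ _⟩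
    intro hnil
    rw [hnil] at hlen
    simp at hlen
    omega
  · rintro ⟨hne, hpre⟩
    have hle : x.length ≤ r.length := hpre.length_le
    have h1 : 0 < x.length := List.length_pos_iff.mpr hne
    refine ⟨(x.length : Int), ⟨by omega, by push_cast; omega⟩, ?_⟩
    rw [PySem.List.slice_to r (by omega)]
    simp only [Int.toNat_natCast]
    exact (List.prefix_iff_eq_take.mp hpre).symm

theorem seenInv_update (p : List String) (seen : PySem.Set (List Char))
    (hseen : SeenInv p seen) (s : String) :
    SeenInv (p ++ [s]) (PySem.Set.update seen
      ((PySem.List.pyRange 1 ((s.toList.reverse.length : Int) + 1) 1).map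
        (fun m => PySem.List.slice s.toList.reverse none (some m)))) := by
  intro x
  rw [PySem.Set.mem_update, hseen x, mem_prefixList]
  constructor
  · rintro (⟨hne, s', hs', hp⟩ | ⟨hne, hp⟩)
    · exact ⟨hne, s', by simp [hs'], hp⟩
    · exact ⟨hne, s, by simp, hp⟩
  · rintro ⟨hne, s', hs', hp⟩
    rcases List.mem_append.mp hs' with h | h
    · exact Or.inl ⟨hne, s', h, hp⟩
    · rw [List.mem_singleton.mp h] at hp
      exact Or.inr ⟨hne, hp⟩

theorem goodmax_nil : GoodMax [] 0 := by
  refine ⟨?_, le_refl 0, Or.inl rfl⟩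
  rintro v ⟨t, u, hsub, -⟩
  simp at hsub

theorem cslv_comm_lcp (t s : String) : cslv t s = (lcp s.toList.reverse t.toList.reverse : Nat) := by
  unfold cslv
  rw [lcp_comm]

theorem foldB : ∀ (rest p : List String) (b : Int) (seen : PySem.Set (List Char)),
    SeenInv p seen → GoodMax p b →
    GoodMax (p ++ rest)
      ((rest.foldl (fun (st : Int × PySem.Set (List Char)) s =>
          let r := s.toList.reverse
          let k := bScan st.2 r 0
          let best := if (k : Int) > st.1 then (k : Int) else st.1
          (best, PySem.Set.update st.2
            ((PySem.List.pyRange 1 ((r.length : Int) + 1) 1).map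
              (fun m => PySem.List.slice r none (some m)))))
        (b, seen)).1) := by
  intro rest
  induction rest with
  | nil =>
    intro p b seen _ hg
    simpa using hg
  | cons s rest ih =>
    intro p b seen hseen hg
    have hK := bScanGo_spec p seen hseen s.toList.reverse s.toList.reverse.length 0
      (by omega) (Or.inl rfl)
    have hbs : bScan seen s.toList.reverse 0 = bScanGo seen s.toList.reverse s.toList.reverse.length 0 := by
      unfold bScan
      congr 1
    rw [← hbs] at hK
    have hgood : GoodMax (p ++ [s])
        (if ((bScan seen s.toList.reverse 0 : Nat) : Int) > b
         then ((bScan seen s.toList.reverse 0 : Nat) : Int) else b) := by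
      set K := bScan seen s.toList.reverse 0 with hKdef
      set b' : Int := if ((K : Nat) : Int) > b then ((K : Nat) : Int) else b with hb'
      have hbb' : b ≤ b' := by rw [hb']; split <;> omega
      have hKb' : ((K : Nat) : Int) ≤ b' := by rw [hb']; split <;> omega
      refine ⟨?_, by have := hg.2.1; omega, ?_⟩
      · intro v hv
        rcases (isPV_append p s v).mp hv with h | ⟨t, ht, hveq⟩
        · exact le_trans (hg.1 v h) hbb'
        · rw [hveq, cslv_comm_lcp]
          have := hK.1 t ht
          omega
      · by_cases hgt : ((K : Nat) : Int) > b
        · rw [hb', if_pos hgt]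
          rcases hK.2 with h0 | ⟨t, ht, hKeq⟩
          · rw [h0]; exact Or.inl (by simp)
          · refine Or.inr ((isPV_append p s _).mpr (Or.inr ⟨t, ht, ?_⟩))
            rw [cslv_comm_lcp, hKeq]
        · rw [hb', if_neg hgt]
          rcases hg.2.2 with h0 | h
          · exact Or.inl h0
          · exact Or.inr ((isPV_append p s b).mpr (Or.inl h))
    have hseen' := seenInv_update p seen hseen s
    have := ih (p ++ [s]) _ _ hseen' hgood
    have hassoc : p ++ s :: rest = (p ++ [s]) ++ rest := by simp
    rw [hassoc]
    exact this

theorem B_good (l : List String) : GoodMax l (maxSame_alt l) := by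
  have hempty : SeenInv [] PySem.Set.empty := by
    intro x
    simp [PySem.Set.empty]
  have := foldB l [] 0 PySem.Set.empty hempty goodmax_nil
  simpa [maxSame_alt] using this

theorem maxSame_spec : Claim_equal_maxSame := by
  intro l _ hpre
  unfold Pre_maxSame at hpre
  unfold Spec_maxSame
  exact goodmax_unique (A_good l hpre) (B_good l)
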